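-- pv_equiv track=rewrite | github.com/Hugekyung/teamnote1 | codingTest/lottery_winning_N.py | solution
-- ===== SOURCE A (Python) =====
-- def solution(lottery):
--     user_dic = {}
--     cnt = {}
--     for lot in lottery:
--         user = lot[0]
--         vic_loto = lot[1]
--         user_dic[user] = 0
--         cnt[user] = 0
--
--     for lot in lottery:
--         user = lot[0]
--         vic_loto = lot[1]
--         cnt[user] += 1
--         user_dic[user] += vic_loto
--
--     total_cnt = 0
--     zero_list = []
--     for _id1, c in cnt.items():
--         for _id2, u in user_dic.items():
--             if _id1 == _id2 and u > 1:
--                 c = (c - u) + 1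
--             elif _id1 == _id2 and u == 0:
--                 zero_list.append(_id1)
--         total_cnt += c
--     if zero_list != []:
--         for z in zero_list:
--             del cnt[z]
--     if cnt == {}:
--         return 0
--     result = total_cnt // len(cnt)
--     return result
-- ===== SOURCE B (Python) =====
-- def solution(lottery):
--     # one-pass per-user sums; counts recovered algebraically (sum of counts = len(lottery))
--     sums = {}
--     for lot in lottery:
--         sums[lot[0]] = sums.get(lot[0], 0) + lot[1]
--     total_cnt = len(lottery) - sum(u - 1 for u in sums.values() if u > 1)
--     denom = sum(1 for u in sums.values() if u != 0)
--     return 0 if denom == 0 else total_cnt // denom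
-- ===== Notes on version B (the rewrite author's own statement) =====
-- stated objective: simpler
-- what changed: B keeps a single per-user sum dict built in one pass and computes A's adjusted total by the algebraic identity total = len(lottery) - sum(u-1 for per-user sums u>1) and the denominator as the number of users with nonzero sum, eliminating A's second dict, its second accumulation pass, its quadratic nested items loop and the zero-key deletion pass.
import Mathlib
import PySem

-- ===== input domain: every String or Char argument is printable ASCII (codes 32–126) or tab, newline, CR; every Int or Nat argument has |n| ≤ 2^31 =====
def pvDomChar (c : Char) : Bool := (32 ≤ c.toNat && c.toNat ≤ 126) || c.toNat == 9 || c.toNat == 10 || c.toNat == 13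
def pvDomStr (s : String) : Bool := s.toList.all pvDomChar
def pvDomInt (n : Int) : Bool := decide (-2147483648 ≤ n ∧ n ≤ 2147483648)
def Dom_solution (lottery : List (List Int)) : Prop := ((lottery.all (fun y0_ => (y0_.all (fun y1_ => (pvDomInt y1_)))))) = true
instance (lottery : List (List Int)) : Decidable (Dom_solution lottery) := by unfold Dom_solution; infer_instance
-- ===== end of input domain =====

-- B aggregates only per-user sums in one pass and recovers A's adjusted total algebraically
-- (total = len(lottery) - Σ(u-1 | u>1)); objective: simpler (one dict, one pass, closed form).


-- ===== PORT A =====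
-- first loop: user_dic[user] = 0; cnt[user] = 0
def aInit (st : PySem.Dict Int Int × PySem.Dict Int Int) (lot : List Int) :
    PySem.Dict Int Int × PySem.Dict Int Int :=
  let user := PySem.List.pyGetD lot 0 0
  let _vic_loto := PySem.List.pyGetD lot 1 0
  (st.1.insert user 0, st.2.insert user 0)

-- second loop: cnt[user] += 1; user_dic[user] += vic_loto
def aAccum (st : PySem.Dict Int Int × PySem.Dict Int Int) (lot : List Int) :
    PySem.Dict Int Int × PySem.Dict Int Int :=
  let user := PySem.List.pyGetD lot 0 0
  let vic_loto := PySem.List.pyGetD lot 1 0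
  (st.1.modify user 0 (· + vic_loto), st.2.modify user 0 (· + 1))

-- inner loop over user_dic.items(); state (c, zero_list)
def aInner (id1 : Int) (cz : Int × List Int) (q : Int × Int) : Int × List Int :=
  if id1 = q.1 ∧ q.2 > 1 then ((cz.1 - q.2) + 1, cz.2)
  else if id1 = q.1 ∧ q.2 = 0 then (cz.1, cz.2 ++ [id1])
  else cz

-- outer loop over cnt.items(); state (total_cnt, zero_list)
def aOuter (userDic : PySem.Dict Int Int) (st : Int × List Int) (p : Int × Int) : Int × List Int :=
  let cz := userDic.items.foldl (aInner p.1) (p.2, st.2)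
  (st.1 + cz.1, cz.2)

def solution (lottery : List (List Int)) : Int :=
  let p := lottery.foldl aInit (PySem.Dict.empty, PySem.Dict.empty)
  let q := lottery.foldl aAccum p
  let user_dic := q.1
  let cnt := q.2
  let r := cnt.items.foldl (aOuter user_dic) (0, [])
  let total_cnt := r.1
  let zero_list := r.2
  let cnt2 := if zero_list ≠ [] then zero_list.foldl (fun d z => d.erase z) cnt else cnt
  if cnt2 = PySem.Dict.empty then 0
  else PySem.Int.floordiv total_cnt (cnt2.size : Int)

-- ===== PORT B =====
def solution_alt (lottery : List (List Int)) : Int :=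
  let sums := lottery.foldl
    (fun (d : PySem.Dict Int Int) lot =>
      d.insert (PySem.List.pyGetD lot 0 0)
        (d.getD (PySem.List.pyGetD lot 0 0) 0 + PySem.List.pyGetD lot 1 0))
    PySem.Dict.empty
  let total_cnt := (lottery.length : Int) -
    (((sums.values.filter (fun u => decide (1 < u))).map (fun u => u - 1)).sum)
  let denom := ((sums.values.filter (fun u => decide (u ≠ 0))).map (fun _ => (1 : Int))).sum
  if denom = 0 then 0 else PySem.Int.floordiv total_cnt denom

-- ===== PRECONDITION & SPEC =====
-- A indexes lot[0] and lot[1] in every row: rows shorter than 2 make A raise IndexError,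
-- so Pre_ admits exactly the lists whose rows have length ≥ 2.
def Pre_solution (lottery : List (List Int)) : Prop := ∀ lot ∈ lottery, 2 ≤ lot.length
instance (lottery : List (List Int)) : Decidable (Pre_solution lottery) := by
  unfold Pre_solution; infer_instance
def pvWitness_solution : List (List Int) := [[1, 2], [1, 3], [2, 0]]

def Spec_solution (lottery : List (List Int)) (out : Int) : Prop := out = solution_alt lottery
instance (lottery : List (List Int)) (out : Int) : Decidable (Spec_solution lottery out) := by
  unfold Spec_solution; infer_instance

-- ===== CLAIM (what is proved, stated in full; the proofs are below) =====
def Claim_equal_solution : Prop := ∀ (lottery : List (List Int)),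
  Dom_solution lottery → Pre_solution lottery → Spec_solution lottery (solution lottery)

-- ===== LEMMAS AND PROOFS =====
def pvKeyOf (lot : List Int) : Int := PySem.List.pyGetD lot 0 0
def pvValOf (lot : List Int) : Int := PySem.List.pyGetD lot 1 0
def pvPairsOf (l : List (List Int)) : List (Int × Int) := l.map (fun lot => (pvKeyOf lot, pvValOf lot))
def pvUsersOf (l : List (List Int)) : List Int := PySem.Set.ofList (l.map pvKeyOf)
def pvSOf (l : List (List Int)) (k : Int) : Int :=
  (((pvPairsOf l).filter (fun p => p.1 == k)).map Prod.snd).sum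
def pvCOf (l : List (List Int)) (k : Int) : Int := ((l.map pvKeyOf).count k : Int)
def pvDOf (l : List (List Int)) : List Int := (pvUsersOf l).filter (fun k => decide (pvSOf l k ≠ 0))
def pvTOf (l : List (List Int)) : Int :=
  ((pvUsersOf l).map (fun k => if 1 < pvSOf l k then pvCOf l k - pvSOf l k + 1 else pvCOf l k)).sum

-- dict lemmas specialised to the two programs
lemma getD_fold_insert_zero (xs : List Int) (d : PySem.Dict Int Int) (k : Int)
    (h : d.getD k 0 = 0) : (xs.foldl (fun d x => d.insert x (0 : Int)) d).getD k 0 = 0 := by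
  induction xs generalizing d with
  | nil => simpa using h
  | cons x xs ih =>
    simp only [List.foldl_cons]
    exact ih _ (by rw [PySem.Dict.getD_insert]; split <;> simp [h])

lemma getD_fold_modify_add (ps : List (Int × Int)) (d : PySem.Dict Int Int) (k : Int) :
    (ps.foldl (fun d p => d.modify p.1 0 (· + p.2)) d).getD k 0 =
      d.getD k 0 + ((ps.filter (fun p => p.1 == k)).map Prod.snd).sum := by
  induction ps generalizing d with
  | nil => simp
  | cons p ps ih =>
    simp only [List.foldl_cons, ih, List.filter_cons]
    rw [PySem.Dict.getD_modify]
    by_cases hk : p.1 = k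
    · subst hk; simp; ring
    · have hk' : ¬ (k = p.1) := fun h => hk h.symm
      simp [hk, hk']

lemma getD_fold_insert_add (ps : List (Int × Int)) (d : PySem.Dict Int Int) (k : Int) :
    (ps.foldl (fun d p => d.insert p.1 (d.getD p.1 0 + p.2)) d).getD k 0 =
      d.getD k 0 + ((ps.filter (fun p => p.1 == k)).map Prod.snd).sum := by
  induction ps generalizing d with
  | nil => simp
  | cons p ps ih =>
    simp only [List.foldl_cons, ih, List.filter_cons]
    rw [PySem.Dict.getD_insert]
    by_cases hk : p.1 = k
    · subst hk; simp; ring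
    · have hk' : ¬ (k = p.1) := fun h => hk h.symm
      simp [hk, hk']

lemma set_update_self (s : PySem.Set Int) (xs : List Int) (hs : ∀ x ∈ xs, x ∈ s) :
    PySem.Set.update s xs = s := by
  rw [PySem.Set.update_eq_append_filter]
  have h : (PySem.Set.ofList xs).filter (fun y => !s.contains y) = [] := by
    rw [List.filter_eq_nil_iff]
    intro y hy
    have hys : y ∈ s := hs y ((PySem.Set.mem_ofList xs y).mp hy)
    simp only [PySem.Set.contains, List.elem_eq_true_of_mem hys, Bool.not_true,
      Bool.false_eq_true, not_false_eq_true]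
  rw [h, List.append_nil]

-- inner loop: no matching key ⇒ identity
lemma aInner_fold_no_match (x : Int) (L : List (Int × Int)) (init : Int × List Int)
    (h : ∀ q ∈ L, q.1 ≠ x) : L.foldl (aInner x) init = init := by
  induction L generalizing init with
  | nil => rfl
  | cons q L ih =>
    have hq : q.1 ≠ x := h q (by simp)
    have hstep : aInner x init q = init := by
      have h1 : ¬ (x = q.1 ∧ q.2 > 1) := fun hc => hq hc.1.symm
      have h2 : ¬ (x = q.1 ∧ q.2 = 0) := fun hc => hq hc.1.symm
      simp [aInner, h1, h2]
    rw [List.foldl_cons, hstep]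
    exact ih _ (fun q hq' => h q (List.mem_cons_of_mem _ hq'))

-- inner loop: unique matching key (x, v) ⇒ one adjustment
lemma aInner_fold_unique (x v : Int) (L : List (Int × Int)) (hn : (L.map Prod.fst).Nodup)
    (hx : (x, v) ∈ L) : ∀ (init : Int × List Int),
    L.foldl (aInner x) init =
      ((if 1 < v then init.1 - v + 1 else init.1), (if v = 0 then init.2 ++ [x] else init.2)) := by
  induction L with
  | nil => simp at hx
  | cons q L ih =>
    intro init
    simp only [List.map_cons, List.nodup_cons] at hn
    rcases List.mem_cons.mp hx with hq | hq
    · subst hq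
      have h1 : aInner x init (x, v) =
          ((if 1 < v then init.1 - v + 1 else init.1),
           (if v = 0 then init.2 ++ [x] else init.2)) := by
        by_cases hv : 1 < v
        · have h0 : ¬ v = 0 := by omega
          simp [aInner, hv, h0]
        · by_cases h0 : v = 0 <;> simp [aInner, hv, h0]
      rw [List.foldl_cons, h1]
      refine aInner_fold_no_match x L _ (fun r hr hrx => hn.1 ?_)
      have hm : r.1 ∈ L.map Prod.fst := List.mem_map_of_mem (f := Prod.fst) hr
      rw [hrx] at hm
      exact hm
    · have hq1 : q.1 ≠ x := by
        intro he
        exact hn.1 (he ▸ (show (x, v).1 ∈ L.map Prod.fst from List.mem_map_of_mem hq))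
      have hstep : aInner x init q = init := by
        have h1 : ¬ (x = q.1 ∧ q.2 > 1) := fun hc => hq1 hc.1.symm
        have h2 : ¬ (x = q.1 ∧ q.2 = 0) := fun hc => hq1 hc.1.symm
        simp [aInner, h1, h2]
      rw [List.foldl_cons, hstep]
      exact ih hn.2 hq init

-- outer loop over any sublist of the users whose (key, sum) pairs are all in user_dic
lemma aOuter_fold (ud : PySem.Dict Int Int) (C S : Int → Int)
    (hn : (ud.items.map Prod.fst).Nodup) :
    ∀ (sub : List Int), (∀ k ∈ sub, (k, S k) ∈ ud.items) → ∀ (t : Int) (zl : List Int),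
    (sub.map (fun k => (k, C k))).foldl (aOuter ud) (t, zl) =
      (t + (sub.map (fun k => if 1 < S k then C k - S k + 1 else C k)).sum,
       zl ++ sub.filter (fun k => S k == 0)) := by
  intro sub
  induction sub with
  | nil => intro _ t zl; simp
  | cons k sub ih =>
    intro hsub t zl
    have hk : (k, S k) ∈ ud.items := hsub k (by simp)
    have hstep : aOuter ud (t, zl) (k, C k) =
        (t + (if 1 < S k then C k - S k + 1 else C k),
         if S k = 0 then zl ++ [k] else zl) := by
      simp only [aOuter]
      rw [aInner_fold_unique k (S k) ud.items hn hk (C k, zl)]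
    rw [List.map_cons, List.foldl_cons, hstep,
      ih (fun j hj => hsub j (List.mem_cons_of_mem _ hj)) _ _, List.filter_cons]
    by_cases h0 : S k = 0 <;> simp [h0, add_assoc]

-- erase loop is one filter on the items
lemma erase_fold_items (zs : List Int) (d : PySem.Dict Int Int) :
    (zs.foldl (fun d z => d.erase z) d).items = d.items.filter (fun p => !(zs.contains p.1)) := by
  induction zs generalizing d with
  | nil => simp
  | cons z zs ih =>
    rw [List.foldl_cons, ih (d.erase z),
      show (d.erase z).items = d.items.filter (fun p => !(p.1 == z)) from rfl,
      List.filter_filter]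
    apply List.filter_congr
    intro p _
    by_cases h : p.1 = z <;> simp [h]

-- generic list-sum helpers (specific shapes of the two programs)
lemma sum_map_filter_eq_sum_ite (us : List Int) (p : Int → Bool) (h : Int → Int) :
    ((us.filter p).map h).sum = (us.map (fun k => if p k then h k else 0)).sum := by
  induction us with
  | nil => rfl
  | cons k us ih =>
    rw [List.filter_cons, List.map_cons]
    by_cases hp : p k <;> simp [hp, ih]

lemma sum_map_sub_int (us : List Int) (f g : Int → Int) :
    (us.map (fun k => f k - g k)).sum = (us.map f).sum - (us.map g).sum := by
  induction us with
  | nil => simp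
  | cons k us ih => simp [ih]; ring

-- the three dict states of A and the one of B
def pvUD0 (l : List (List Int)) : PySem.Dict Int Int :=
  l.foldl (fun d lot => d.insert (pvKeyOf lot) (0 : Int)) PySem.Dict.empty
def pvUD (l : List (List Int)) : PySem.Dict Int Int :=
  l.foldl (fun d lot => d.modify (pvKeyOf lot) 0 (· + pvValOf lot)) (pvUD0 l)
def pvCNT (l : List (List Int)) : PySem.Dict Int Int :=
  l.foldl (fun d lot => d.modify (pvKeyOf lot) 0 (· + 1)) (pvUD0 l)
def pvSUMS (l : List (List Int)) : PySem.Dict Int Int :=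
  l.foldl (fun d lot => d.insert (pvKeyOf lot) (d.getD (pvKeyOf lot) 0 + pvValOf lot))
    PySem.Dict.empty

lemma pvUD0_keys (l : List (List Int)) : (pvUD0 l).keys = pvUsersOf l := by
  rw [show (pvUD0 l).keys =
      PySem.Set.update (PySem.Dict.empty : PySem.Dict Int Int).keys (l.map pvKeyOf) from
    PySem.Dict.keys_foldl_insert_key l pvKeyOf (fun _ _ => 0) PySem.Dict.empty]
  exact PySem.Set.update_nil_left (l.map pvKeyOf)

lemma pvUD0_nodup (l : List (List Int)) : (pvUD0 l).keys.Nodup :=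
  PySem.Dict.nodup_keys_foldl_insert_key l pvKeyOf (fun _ _ => 0) PySem.Dict.empty
    PySem.Dict.nodup_keys_empty

lemma pvUD0_getD (l : List (List Int)) (k : Int) : (pvUD0 l).getD k 0 = 0 := by
  rw [show pvUD0 l = (l.map pvKeyOf).foldl (fun d x => d.insert x (0 : Int)) PySem.Dict.empty from
    (@List.foldl_map (List Int) Int (PySem.Dict Int Int) pvKeyOf
      (fun d x => d.insert x (0 : Int)) l PySem.Dict.empty).symm]
  exact getD_fold_insert_zero _ _ _ (by simp)

lemma pvUD_keys (l : List (List Int)) : (pvUD l).keys = pvUsersOf l := by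
  rw [show (pvUD l).keys = PySem.Set.update (pvUD0 l).keys (l.map pvKeyOf) from
    PySem.Dict.keys_foldl_modify_key l pvKeyOf 0 (fun _ lot v => v + pvValOf lot) (pvUD0 l),
    pvUD0_keys]
  exact set_update_self _ _ (fun x hx => (PySem.Set.mem_ofList _ _).mpr hx)

lemma pvUD_nodup (l : List (List Int)) : (pvUD l).keys.Nodup :=
  PySem.Dict.nodup_keys_foldl_modify_key l pvKeyOf 0 (fun _ lot v => v + pvValOf lot) (pvUD0 l)
    (pvUD0_nodup l)

lemma pvUD_getD (l : List (List Int)) (k : Int) : (pvUD l).getD k 0 = pvSOf l k := by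
  rw [show pvUD l = (pvPairsOf l).foldl (fun d p => d.modify p.1 0 (· + p.2)) (pvUD0 l) from
    (@List.foldl_map (List Int) (Int × Int) (PySem.Dict Int Int)
      (fun lot => (pvKeyOf lot, pvValOf lot))
      (fun d p => d.modify p.1 0 (· + p.2)) l (pvUD0 l)).symm,
    getD_fold_modify_add, pvUD0_getD]
  simp [pvSOf]

lemma pvCNT_keys (l : List (List Int)) : (pvCNT l).keys = pvUsersOf l := by
  rw [show (pvCNT l).keys = PySem.Set.update (pvUD0 l).keys (l.map pvKeyOf) from
    PySem.Dict.keys_foldl_modify_key l pvKeyOf 0 (fun _ _ v => v + 1) (pvUD0 l), pvUD0_keys]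
  exact set_update_self _ _ (fun x hx => (PySem.Set.mem_ofList _ _).mpr hx)

lemma pvCNT_nodup (l : List (List Int)) : (pvCNT l).keys.Nodup :=
  PySem.Dict.nodup_keys_foldl_modify_key l pvKeyOf 0 (fun _ _ v => v + 1) (pvUD0 l)
    (pvUD0_nodup l)

lemma pvCNT_getD (l : List (List Int)) (k : Int) : (pvCNT l).getD k 0 = pvCOf l k := by
  rw [show pvCNT l = (l.map pvKeyOf).foldl (fun d x => d.modify x 0 (· + 1)) (pvUD0 l) from
    (@List.foldl_map (List Int) Int (PySem.Dict Int Int) pvKeyOf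
      (fun d x => d.modify x 0 (· + 1)) l (pvUD0 l)).symm,
    PySem.Dict.getD_foldl_modify_add_one, pvUD0_getD]
  simp [pvCOf]

lemma pvUD_items (l : List (List Int)) :
    (pvUD l).items = (pvUsersOf l).map (fun k => (k, pvSOf l k)) := by
  rw [PySem.Dict.items_eq_map_keys (pvUD l) (pvUD_nodup l) 0, pvUD_keys]
  exact List.map_congr_left (fun k _ => by rw [pvUD_getD])

lemma pvCNT_items (l : List (List Int)) :
    (pvCNT l).items = (pvUsersOf l).map (fun k => (k, pvCOf l k)) := by
  rw [PySem.Dict.items_eq_map_keys (pvCNT l) (pvCNT_nodup l) 0, pvCNT_keys]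
  exact List.map_congr_left (fun k _ => by rw [pvCNT_getD])

lemma pvUD_items_fst_nodup (l : List (List Int)) : ((pvUD l).items.map Prod.fst).Nodup := by
  have h : List.map Prod.fst ((pvUsersOf l).map (fun k => (k, pvSOf l k))) = pvUsersOf l := by
    simp [Function.comp_def]
  rw [pvUD_items, h]
  exact PySem.Set.nodup_ofList _

lemma pvSUMS_keys (l : List (List Int)) : (pvSUMS l).keys = pvUsersOf l := by
  rw [show (pvSUMS l).keys =
      PySem.Set.update (PySem.Dict.empty : PySem.Dict Int Int).keys (l.map pvKeyOf) from
    PySem.Dict.keys_foldl_insert_key l pvKeyOf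
      (fun d lot => d.getD (pvKeyOf lot) 0 + pvValOf lot) PySem.Dict.empty]
  exact PySem.Set.update_nil_left (l.map pvKeyOf)

lemma pvSUMS_nodup (l : List (List Int)) : (pvSUMS l).keys.Nodup :=
  PySem.Dict.nodup_keys_foldl_insert_key l pvKeyOf
    (fun d lot => d.getD (pvKeyOf lot) 0 + pvValOf lot) PySem.Dict.empty
    PySem.Dict.nodup_keys_empty

lemma pvSUMS_getD (l : List (List Int)) (k : Int) : (pvSUMS l).getD k 0 = pvSOf l k := by
  rw [show pvSUMS l =
      (pvPairsOf l).foldl (fun d p => d.insert p.1 (d.getD p.1 0 + p.2)) PySem.Dict.empty from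
    (@List.foldl_map (List Int) (Int × Int) (PySem.Dict Int Int)
      (fun lot => (pvKeyOf lot, pvValOf lot))
      (fun d p => d.insert p.1 (d.getD p.1 0 + p.2)) l PySem.Dict.empty).symm,
    getD_fold_insert_add]
  simp [pvSOf]

lemma pvSUMS_values (l : List (List Int)) :
    (pvSUMS l).values = (pvUsersOf l).map (fun k => pvSOf l k) := by
  rw [PySem.Dict.values_eq_map_keys (pvSUMS l) (pvSUMS_nodup l) 0, pvSUMS_keys]
  exact List.map_congr_left (fun k _ => by rw [pvSUMS_getD])

lemma sum_map_one (xs : List Int) : (xs.map (fun _ => (1 : Int))).sum = (xs.length : Int) := by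
  induction xs with
  | nil => simp
  | cons x xs ih => simp; omega

lemma sum_counts (l : List (List Int)) :
    ((pvUsersOf l).map (fun k => pvCOf l k)).sum = (l.length : Int) := by
  have hperm : (pvUsersOf l).Perm (l.map pvKeyOf).dedup :=
    (List.perm_ext_iff_of_nodup (PySem.Set.nodup_ofList _) (List.nodup_dedup _)).mpr
      (fun a => by rw [PySem.Set.mem_ofList, List.mem_dedup])
  rw [(hperm.map (fun k => pvCOf l k)).sum_eq]
  have h3 : ((l.map pvKeyOf).dedup.map (fun k => pvCOf l k)).sum =
      ((((l.map pvKeyOf).dedup.map (fun x => List.count x (l.map pvKeyOf))).sum : Nat) : Int) := by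
    rw [Nat.cast_list_sum, List.map_map]
    rfl
  rw [h3, List.sum_map_count_dedup_eq_length, List.length_map]

-- a user is in the zero list iff it is a user with per-user sum 0
lemma mem_zero_list (l : List (List Int)) (k : Int) (hk : k ∈ pvUsersOf l) :
    ((pvUsersOf l).filter (fun k => pvSOf l k == 0)).contains k = !(decide (pvSOf l k ≠ 0)) := by
  by_cases h0 : pvSOf l k = 0
  · have hm : k ∈ (pvUsersOf l).filter (fun k => pvSOf l k == 0) :=
      List.mem_filter.mpr ⟨hk, by simp [h0]⟩
    simp [h0, hk]
  · have hm : k ∉ (pvUsersOf l).filter (fun k => pvSOf l k == 0) := by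
      intro hc
      exact h0 (by simpa using (List.mem_filter.mp hc).2)
    simp [h0, List.contains_eq_mem, hm]

-- characterisation of A
lemma solution_eq (l : List (List Int)) :
    solution l = if pvDOf l = [] then 0
      else PySem.Int.floordiv (pvTOf l) (((pvDOf l).length : Int)) := by
  have hE : l.foldl aAccum (l.foldl aInit (PySem.Dict.empty, PySem.Dict.empty)) =
      (pvUD l, pvCNT l) := by
    rw [show l.foldl aInit (PySem.Dict.empty, PySem.Dict.empty) = (pvUD0 l, pvUD0 l) from
      PySem.List.foldl_prod_mk (fun d lot => d.insert (pvKeyOf lot) (0 : Int))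
        (fun d lot => d.insert (pvKeyOf lot) (0 : Int)) l PySem.Dict.empty PySem.Dict.empty]
    exact PySem.List.foldl_prod_mk (fun d lot => d.modify (pvKeyOf lot) 0 (· + pvValOf lot))
      (fun d lot => d.modify (pvKeyOf lot) 0 (· + 1)) l (pvUD0 l) (pvUD0 l)
  have hE1 : (l.foldl aAccum (l.foldl aInit (PySem.Dict.empty, PySem.Dict.empty))).1 = pvUD l := by
    rw [hE]
  have hE2 : (l.foldl aAccum (l.foldl aInit (PySem.Dict.empty, PySem.Dict.empty))).2 = pvCNT l := by
    rw [hE]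
  have hR : (pvCNT l).items.foldl (aOuter (pvUD l)) (0, []) =
      (pvTOf l, (pvUsersOf l).filter (fun k => pvSOf l k == 0)) := by
    rw [pvCNT_items,
      aOuter_fold (pvUD l) (pvCOf l) (pvSOf l) (pvUD_items_fst_nodup l) (pvUsersOf l)
        (fun k hk => by
          rw [pvUD_items]
          exact List.mem_map_of_mem (f := fun k => (k, pvSOf l k)) hk) 0 []]
    simp [pvTOf]
  have hR1 : ((pvCNT l).items.foldl (aOuter (pvUD l)) (0, [])).1 = pvTOf l := by rw [hR]
  have hR2 : ((pvCNT l).items.foldl (aOuter (pvUD l)) (0, [])).2 =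
      (pvUsersOf l).filter (fun k => pvSOf l k == 0) := by rw [hR]
  have hitems : (if ((pvUsersOf l).filter (fun k => pvSOf l k == 0)) ≠ [] then
        ((pvUsersOf l).filter (fun k => pvSOf l k == 0)).foldl (fun d z => d.erase z) (pvCNT l)
      else (pvCNT l)).items = (pvDOf l).map (fun k => (k, pvCOf l k)) := by
    by_cases hz : ((pvUsersOf l).filter (fun k => pvSOf l k == 0)) = []
    · rw [if_neg (by simp [hz]), pvCNT_items]
      have hDall : pvDOf l = pvUsersOf l := by
        unfold pvDOf
        refine List.filter_eq_self.mpr (fun k hk => ?_)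
        by_cases h0 : pvSOf l k = 0
        · exact absurd (hz ▸ List.mem_filter.mpr ⟨hk, by simp [h0]⟩) (List.not_mem_nil)
        · simp [h0]
      rw [hDall]
    · rw [if_pos hz, erase_fold_items, pvCNT_items, List.filter_map]
      have hf : (pvUsersOf l).filter
          ((fun p : Int × Int =>
              !(((pvUsersOf l).filter (fun k => pvSOf l k == 0)).contains p.1)) ∘
            (fun k => (k, pvCOf l k))) = pvDOf l := by
        unfold pvDOf
        refine List.filter_congr (fun k hk => ?_)
        simp only [Function.comp]
        rw [mem_zero_list l k hk]
        simp
      rw [hf]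
  have hsize : (if ((pvUsersOf l).filter (fun k => pvSOf l k == 0)) ≠ [] then
        ((pvUsersOf l).filter (fun k => pvSOf l k == 0)).foldl (fun d z => d.erase z) (pvCNT l)
      else (pvCNT l)).size = (pvDOf l).length := by
    show (if ((pvUsersOf l).filter (fun k => pvSOf l k == 0)) ≠ [] then
        ((pvUsersOf l).filter (fun k => pvSOf l k == 0)).foldl (fun d z => d.erase z) (pvCNT l)
      else (pvCNT l)).items.length = (pvDOf l).length
    rw [hitems, List.length_map]
  have hcond : ((if ((pvUsersOf l).filter (fun k => pvSOf l k == 0)) ≠ [] then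
        ((pvUsersOf l).filter (fun k => pvSOf l k == 0)).foldl (fun d z => d.erase z) (pvCNT l)
      else (pvCNT l)) = PySem.Dict.empty) ↔ pvDOf l = [] := by
    rw [PySem.Dict.ext_iff, hitems]
    simp [PySem.Dict.empty]
  simp only [solution]
  rw [hE1, hE2, hR1, hR2]
  by_cases hD : pvDOf l = []
  · rw [if_pos (hcond.mpr hD), if_pos hD]
  · rw [if_neg (fun hc => hD (hcond.mp hc)), if_neg hD, hsize]

-- characterisation of B
lemma solution_alt_eq (l : List (List Int)) :
    solution_alt l = if pvDOf l = [] then 0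
      else PySem.Int.floordiv
        ((l.length : Int) -
          ((pvUsersOf l).map (fun k => if 1 < pvSOf l k then pvSOf l k - 1 else 0)).sum)
        (((pvDOf l).length : Int)) := by
  have h0 : solution_alt l =
      (if (((pvSUMS l).values.filter (fun u => decide (u ≠ 0))).map (fun _ => (1 : Int))).sum = 0
        then 0
        else PySem.Int.floordiv
          ((l.length : Int) -
            (((pvSUMS l).values.filter (fun u => decide (1 < u))).map (fun u => u - 1)).sum)
          ((((pvSUMS l).values.filter (fun u => decide (u ≠ 0))).map (fun _ => (1 : Int))).sum)) :=
    rfl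
  have hfil : ((pvUsersOf l).map (fun k => pvSOf l k)).filter (fun u => decide (u ≠ 0)) =
      (pvDOf l).map (fun k => pvSOf l k) := by
    rw [List.filter_map]
    rfl
  have hden : (((pvDOf l).map (fun k => pvSOf l k)).map (fun _ => (1 : Int))).sum =
      ((pvDOf l).length : Int) := by
    rw [sum_map_one, List.length_map]
  have htot : ((((pvUsersOf l).map (fun k => pvSOf l k)).filter
        (fun u => decide (1 < u))).map (fun u => u - 1)).sum =
      ((pvUsersOf l).map (fun k => if 1 < pvSOf l k then pvSOf l k - 1 else 0)).sum := by
    rw [List.filter_map, List.map_map, sum_map_filter_eq_sum_ite]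
    refine congrArg List.sum (List.map_congr_left (fun k _ => ?_))
    by_cases h1 : 1 < pvSOf l k <;> simp [h1]
  rw [h0, pvSUMS_values, hfil, hden, htot]
  by_cases hD : pvDOf l = []
  · rw [if_pos (by simp [hD]), if_pos hD]
  · have hne : ¬ (((pvDOf l).length : Int) = 0) := by
      simp only [Nat.cast_eq_zero, List.length_eq_zero_iff]
      exact hD
    rw [if_neg hne, if_neg hD]

-- the algebraic identity: Σ over distinct users of adjusted counts = len − Σ (u−1 | u>1)
lemma pvT_eq (l : List (List Int)) :
    pvTOf l = (l.length : Int) -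
      ((pvUsersOf l).map (fun k => if 1 < pvSOf l k then pvSOf l k - 1 else 0)).sum := by
  unfold pvTOf
  have hpt : ∀ k, (if 1 < pvSOf l k then pvCOf l k - pvSOf l k + 1 else pvCOf l k) =
      pvCOf l k - (if 1 < pvSOf l k then pvSOf l k - 1 else 0) := by
    intro k; split_ifs <;> ring
  rw [List.map_congr_left (fun k _ => hpt k), sum_map_sub_int, sum_counts]

-- ===== VERDICT (by name: the statement is the Claim_ definition above) =====
theorem solution_spec : Claim_equal_solution := by
  intro l _ _
  unfold Spec_solution
  rw [solution_eq, solution_alt_eq, pvT_eq]
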